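-- pv_equiv track=rewrite | github.com/AdamZhouSE/pythonHomework | Code/CodeRecords/2767/60640/273559.py | nums
-- ===== SOURCE A (Python) =====
-- def nums(n):
--     table = [0 for x in range(n+1)]
--     table[0] = 1
--     for i in range(3, n+1):
--         table[i] += table[i-3]
--     for i in range(5, n+1):
--         table[i] += table[i-5]
--     for i in range(10, n+1):
--         table[i] += table[i-10]
--     return table[n]
-- ===== SOURCE B (Python) =====
-- _B = [3, 2, 1, 3, 2, 4, 3, 2, 4, 3, 5, 4, 3, 5, 4, 6, 5, 4, 6, 5, 7, 6, 5, 7, 6, 8, 7, 6, 8, 7]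
-- _C = [1, 0, 0, 1, 0, 1, 1, 0, 1, 1, 2, 1, 1, 2, 1, 3, 2, 1, 3, 2, 4, 3, 2, 4, 3, 5, 4, 3, 5, 4]
--
-- def nums(n):
--     # closed-form quasi-polynomial (period 30) for the coin-DP with coins {3,5,10}
--     q, r = divmod(n, 30)
--     return 3 * q * q + _B[r] * q + _C[r]
-- ===== Notes on version B (the rewrite author's own statement) =====
-- stated objective: faster
-- what changed: Replaces the three-pass linear-time dynamic-programming table with the exact closed-form quasi-polynomial of period thirty (quadratic in the quotient, with coefficient tables indexed by the remainder) obtained from the coin set's generating function.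
import Mathlib
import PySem

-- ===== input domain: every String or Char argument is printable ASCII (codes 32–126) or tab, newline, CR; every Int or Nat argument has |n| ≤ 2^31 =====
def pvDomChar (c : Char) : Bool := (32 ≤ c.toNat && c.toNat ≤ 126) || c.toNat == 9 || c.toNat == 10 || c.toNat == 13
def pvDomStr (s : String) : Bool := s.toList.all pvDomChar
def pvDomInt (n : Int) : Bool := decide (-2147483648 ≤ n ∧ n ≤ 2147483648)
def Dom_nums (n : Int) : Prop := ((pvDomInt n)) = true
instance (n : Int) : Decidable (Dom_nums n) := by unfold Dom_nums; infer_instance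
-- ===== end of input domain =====

-- B replaces A's linear-time three-pass DP table by a constant-time closed-form quasi-polynomial (period thirty).

-- ===== PORT A =====
-- one DP pass 'for i in range(c, n+1): table[i] += table[i-c]'; the Python list is an Array Int,
-- indices are in range on every admitted input (i and i-c are nonnegative and < len(table))
def numsPass (c : Int) (n : Int) (t : Array Int) : Array Int :=
  (PySem.List.pyRange c (n + 1) 1).foldl
    (fun t i => t.setIfInBounds i.toNat (t.getD i.toNat 0 + t.getD (i - c).toNat 0)) t

def nums (n : Int) : Int :=
  let table := ((PySem.List.pyRange 0 (n + 1) 1).map (fun _ => (0 : Int))).toArray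
  let table := table.setIfInBounds 0 1
  let table := numsPass 3 n table
  let table := numsPass 5 n table
  let table := numsPass 10 n table
  table.getD n.toNat 0

-- ===== PORT B =====
def betaT : List Int := [3, 2, 1, 3, 2, 4, 3, 2, 4, 3, 5, 4, 3, 5, 4, 6, 5, 4, 6, 5, 7, 6, 5, 7, 6, 8, 7, 6, 8, 7]
def gammaT : List Int := [1, 0, 0, 1, 0, 1, 1, 0, 1, 1, 2, 1, 1, 2, 1, 3, 2, 1, 3, 2, 4, 3, 2, 4, 3, 5, 4, 3, 5, 4]

def nums_alt (n : Int) : Int :=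
  let q := PySem.Int.floordiv n 30
  let r := PySem.Int.mod n 30
  3 * q * q + PySem.List.pyGetD betaT r 0 * q + PySem.List.pyGetD gammaT r 0

-- ===== PRECONDITION & SPEC =====
-- On negative n the Python A raises IndexError (assigning into an empty table), so those inputs are excluded.
def Pre_nums (n : Int) : Prop := 0 ≤ n
instance (n : Int) : Decidable (Pre_nums n) := by unfold Pre_nums; infer_instance
def pvWitness_nums : Int := 7

def Spec_nums (n : Int) (out : Int) : Prop := out = nums_alt n
instance (n : Int) (out : Int) : Decidable (Spec_nums n out) := by unfold Spec_nums; infer_instance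

-- ===== CLAIM (what is proved, stated in full; the proofs are below) =====
def Claim_equal_nums : Prop := ∀ (n : Int), Dom_nums n → Pre_nums n → Spec_nums n (nums n)

-- ===== LEMMAS AND PROOFS =====

-- closed forms for the table after each of the three passes
def g0 (i : Nat) : Int := if i = 0 then 1 else 0
def f3 (i : Nat) : Int := if i % 3 = 0 then 1 else 0
def e15 (r : Nat) : Int := if r = 1 ∨ r = 2 ∨ r = 4 ∨ r = 7 then 0 else 1
def f35 (i : Nat) : Int := ((i / 15 : Nat) : Int) + e15 (i % 15)
def fAll (i : Nat) : Int :=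
  3 * ((i / 30 : Nat) : Int) * ((i / 30 : Nat) : Int)
    + betaT.getD (i % 30) 0 * ((i / 30 : Nat) : Int) + gammaT.getD (i % 30) 0

lemma f3_lt (j : Nat) (h : j < 3) : f3 j = g0 j := by
  unfold f3 g0; split_ifs <;> omega

lemma f3_rec (j : Nat) (h : 3 ≤ j) : f3 j = f3 (j - 3) + g0 j := by
  unfold f3 g0; split_ifs <;> omega

lemma f35_lt (j : Nat) (h : j < 5) : f35 j = f3 j := by
  unfold f35 f3 e15; split_ifs <;> omega

lemma f35_rec (j : Nat) (h : 5 ≤ j) : f35 j = f35 (j - 5) + f3 j := by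
  unfold f35 f3 e15; split_ifs <;> omega

lemma fAll_lt (j : Nat) (h : j < 10) : fAll j = f35 j := by
  interval_cases j <;> decide

lemma fAll_rec (j : Nat) (h : 10 ≤ j) : fAll j = fAll (j - 10) + f35 j := by
  obtain ⟨k, r, hr, rfl⟩ : ∃ k r, r < 30 ∧ j = 30 * k + r :=
    ⟨j / 30, j % 30, Nat.mod_lt _ (by norm_num), (Nat.div_add_mod _ _).symm⟩
  unfold fAll f35
  rcases Nat.lt_or_ge r 10 with hlo | hhi
  · obtain ⟨k', rfl⟩ : ∃ k', k = k' + 1 := ⟨k - 1, by omega⟩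
    have h1 : (30 * (k' + 1) + r - 10) / 30 = k' := by omega
    have h2 : (30 * (k' + 1) + r - 10) % 30 = r + 20 := by omega
    have h3 : (30 * (k' + 1) + r) / 30 = k' + 1 := by omega
    have h4 : (30 * (k' + 1) + r) % 30 = r := by omega
    have h5 : (30 * (k' + 1) + r) / 15 = 2 * k' + 2 := by omega
    have h6 : (30 * (k' + 1) + r) % 15 = r := by omega
    rw [h1, h2, h3, h4, h5, h6]
    interval_cases r <;> simp [betaT, gammaT, e15] <;> ring
  · have h1 : (30 * k + r - 10) / 30 = k := by omega
    have h2 : (30 * k + r - 10) % 30 = r - 10 := by omega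
    have h3 : (30 * k + r) / 30 = k := by omega
    have h4 : (30 * k + r) % 30 = r := by omega
    have h5 : (30 * k + r) / 15 = 2 * k + r / 15 := by omega
    have h6 : (30 * k + r) % 15 = r % 15 := by omega
    rw [h1, h2, h3, h4, h5, h6]
    interval_cases r <;> simp [betaT, gammaT, e15] <;> ring

-- the generic DP pass: folding the body over range(c, m) turns a g-table into an h-table below m
lemma pass_inv (c : Nat) (hc : 0 < c) (g h : Nat → Int)
    (hlt : ∀ j, j < c → h j = g j)
    (hrec : ∀ j, c ≤ j → h j = h (j - c) + g j)
    (N : Nat) (m : Nat) (hm : m ≤ N) (t : List Int)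
    (hlen : t.length = N) (ht : ∀ j, j < N → t.getD j 0 = g j) :
    ((PySem.List.pyRange (c : Int) (m : Int) 1).foldl
        (fun t i => t.set i.toNat (t.getD i.toNat 0 + t.getD (i - c).toNat 0)) t).length = N ∧
    (∀ j, j < N →
      ((PySem.List.pyRange (c : Int) (m : Int) 1).foldl
        (fun t i => t.set i.toNat (t.getD i.toNat 0 + t.getD (i - c).toNat 0)) t).getD j 0
        = if j < m then h j else g j) := by
  induction m with
  | zero =>
      rw [PySem.List.pyRange_one_eq_nil (by exact_mod_cast Nat.zero_le c)]
      refine ⟨hlen, fun j hj => ?_⟩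
      simp only [List.foldl_nil]
      rw [ht j hj]
      simp
  | succ m ih =>
      have hm' : m ≤ N := Nat.le_of_succ_le hm
      rcases Nat.lt_or_ge m c with hmc | hmc
      · rw [PySem.List.pyRange_one_eq_nil (show ((m+1 : Nat) : Int) ≤ (c : Int) by exact_mod_cast hmc)]
        refine ⟨hlen, fun j hj => ?_⟩
        simp only [List.foldl_nil]
        rw [ht j hj]
        split_ifs with hj2
        · exact (hlt j (by omega)).symm
        · rfl
      · obtain ⟨hlen', hget'⟩ := ih hm'
        have hsplit : PySem.List.pyRange (c : Int) ((m+1 : Nat) : Int) 1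
            = PySem.List.pyRange (c : Int) (m : Int) 1 ++ [(m : Int)] := by
          have := PySem.List.pyRange_one_succ_right (a := (c : Int)) (b := (m : Int)) (by exact_mod_cast hmc)
          rw [show ((m+1 : Nat) : Int) = (m : Int) + 1 by push_cast; ring, this]
        rw [hsplit, List.foldl_append]
        set t' := (PySem.List.pyRange (c : Int) (m : Int) 1).foldl
            (fun t i => t.set i.toNat (t.getD i.toNat 0 + t.getD (i - c).toNat 0)) t with ht'
        simp only [List.foldl_cons, List.foldl_nil]
        have hmN : m < N := hm
        have hc1 : ((m : Int)).toNat = m := Int.toNat_natCast m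
        have hc2 : (((m : Int)) - (c : Int)).toNat = m - c := by omega
        rw [hc1, hc2]
        have hvm : t'.getD m 0 = g m := by rw [hget' m hmN]; simp
        have hvmc : t'.getD (m - c) 0 = h (m - c) := by
          rw [hget' (m - c) (by omega)]; simp [Nat.sub_lt_of_pos_le hc hmc]
        rw [hvm, hvmc]
        constructor
        · simp [List.length_set, hlen']
        · intro j hj
          rcases eq_or_ne j m with heq | hne
          · subst heq
            rw [List.getD_eq_getElem?_getD, List.getElem?_set_self (by omega)]
            simp only [Option.getD_some, if_pos (Nat.lt_succ_self j)]
            rw [hrec j hmc]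
            ring
          · rw [List.getD_eq_getElem?_getD, List.getElem?_set_ne (by omega), ← List.getD_eq_getElem?_getD,
              hget' j hj]
            split_ifs <;> first | rfl | (exfalso; omega)

lemma arr_getD (a : Array Int) (k : Nat) : a.getD k 0 = a.toList.getD k 0 := by
  simp [Array.getD_eq_getD_getElem?, List.getD_eq_getElem?_getD]

lemma numsPass_toList (c : Int) (n : Int) (t : Array Int) :
    (numsPass c n t).toList = (PySem.List.pyRange c (n + 1) 1).foldl
      (fun t i => t.set i.toNat (t.getD i.toNat 0 + t.getD (i - c).toNat 0)) t.toList := by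
  unfold numsPass
  generalize PySem.List.pyRange c (n + 1) 1 = xs
  induction xs generalizing t with
  | nil => rfl
  | cons x xs ih =>
      simp only [List.foldl_cons]
      rw [ih, Array.toList_setIfInBounds, arr_getD, arr_getD]

-- ===== VERDICT (by name: the statement is the Claim_ definition above) =====
theorem nums_spec : Claim_equal_nums := by
  intro n _ hn
  unfold Spec_nums nums nums_alt
  rw [arr_getD, numsPass_toList, numsPass_toList, numsPass_toList, Array.toList_setIfInBounds,
    List.toList_toArray]
  set N : Nat := n.toNat + 1 with hNdef
  have hn' : (0:Int) ≤ n := hn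
  have hN : n + 1 = (N : Int) := by omega
  have hn'' : n = ((n.toNat : Nat) : Int) := by omega
  -- initial table
  set t0 : List Int := (PySem.List.pyRange 0 (n + 1) 1).map (fun _ => (0 : Int)) with ht0
  have ht0len : t0.length = N := by
    rw [ht0, List.length_map, PySem.List.length_pyRange_one]; omega
  set t1 : List Int := t0.set 0 1 with ht1def
  have ht1len : t1.length = N := by rw [ht1def, List.length_set]; exact ht0len
  have ht1 : ∀ j, j < N → t1.getD j 0 = g0 j := by
    intro j hj
    rcases eq_or_ne j 0 with rfl | hne
    · rw [ht1def, List.getD_eq_getElem?_getD, List.getElem?_set_self (by omega)]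
      simp [g0]
    · rw [ht1def, List.getD_eq_getElem?_getD, List.getElem?_set_ne (by omega),
        ← List.getD_eq_getElem?_getD, ht0]
      have : j < (PySem.List.pyRange 0 (n + 1) 1).length := by
        rw [PySem.List.length_pyRange_one]; omega
      simp [List.getD_eq_getElem?_getD, g0, hne]
  -- three passes
  have P3 := pass_inv 3 (by norm_num) g0 f3 f3_lt f3_rec N N le_rfl t1 ht1len ht1
  simp only [Nat.cast_ofNat] at P3
  rw [hN] at *
  obtain ⟨P3len, P3get⟩ := P3
  set t2 := (PySem.List.pyRange 3 ((N : Nat) : Int) 1).foldl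
      (fun t i => t.set i.toNat (t.getD i.toNat 0 + t.getD (i - 3).toNat 0)) t1 with ht2
  have ht2get : ∀ j, j < N → t2.getD j 0 = f3 j := by
    intro j hj; rw [P3get j hj, if_pos hj]
  have P5 := pass_inv 5 (by norm_num) f3 f35 f35_lt f35_rec N N le_rfl t2 P3len ht2get
  simp only [Nat.cast_ofNat] at P5
  obtain ⟨P5len, P5get⟩ := P5
  set t3 := (PySem.List.pyRange 5 ((N : Nat) : Int) 1).foldl
      (fun t i => t.set i.toNat (t.getD i.toNat 0 + t.getD (i - 5).toNat 0)) t2 with ht3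
  have ht3get : ∀ j, j < N → t3.getD j 0 = f35 j := by
    intro j hj; rw [P5get j hj, if_pos hj]
  have P10 := pass_inv 10 (by norm_num) f35 fAll fAll_lt fAll_rec N N le_rfl t3 P5len ht3get
  simp only [Nat.cast_ofNat] at P10
  obtain ⟨P10len, P10get⟩ := P10
  set t4 := (PySem.List.pyRange 10 ((N : Nat) : Int) 1).foldl
      (fun t i => t.set i.toNat (t.getD i.toNat 0 + t.getD (i - 10).toNat 0)) t3 with ht4
  have ht4get : t4.getD n.toNat 0 = fAll n.toNat := by
    rw [P10get n.toNat (by omega), if_pos (by omega)]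
  -- final lookup and the closed form
  rw [hn'', Int.toNat_natCast, ht4get]
  simp only [show (30 : Int) = ((30 : Nat) : Int) by norm_num, PySem.Int.floordiv_natCast,
    PySem.Int.mod_natCast, PySem.List.pyGetD_natCast]
  unfold fAll
  rfl
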